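-- pv_equiv track=rewrite | github.com/jerry1700/Algorithm | 백준/Gold/14500. 테트로미노/테트로미노.py | cal_total
-- ===== SOURCE A (Python) =====
-- shape = [
--     [(0, 0), (0, 1), (0, 2), (0, 3)],
--     [(0, 0), (0, 1), (1, 1), (1, 0)],
--     [(0, 0), (1, 0), (2, 0), (2, 1)],
--     [(0, 0), (1, 0), (1, 1), (2, 1)],
--     [(0, 0), (0, 1), (0, 2), (1, 1)],
-- ]
--
-- def cal_total(board, s):
--     N = len(board)
--     M = len(board[0])
--     max_total = 0
--
--     for i in range(N):
--         for j in range(M):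
--             total = 0
--             for dx, dy in shape[s]:
--                 nx, ny = i + dx, j + dy
--                 if 0 <= nx < N and 0 <= ny < M:
--                     total += board[nx][ny]
--
--             if total > max_total:
--                 max_total = total
--
--     return max_total
-- ===== SOURCE B (Python) =====
-- shape = [
--     [(0, 0), (0, 1), (0, 2), (0, 3)],
--     [(0, 0), (0, 1), (1, 1), (1, 0)],
--     [(0, 0), (1, 0), (2, 0), (2, 1)],
--     [(0, 0), (1, 0), (1, 1), (2, 1)],
--     [(0, 0), (0, 1), (0, 2), (1, 1)],
-- ]
--
-- def cal_total(board, s):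
--     N = len(board)
--     M = len(board[0])
--     # offset-major: add one shifted copy of the board per shape cell
--     total = [[0] * M for _ in range(N)]
--     for dx, dy in shape[s]:
--         total = [[total[i][j] + (board[i + dx][j + dy] if i + dx < N and j + dy < M else 0)
--                   for j in range(M)]
--                  for i in range(N)]
--     best = 0
--     for row in total:
--         for v in row:
--             best = max(best, v)
--     return best
-- ===== Notes on version B (the rewrite author's own statement) =====
-- stated objective: alternative
-- what changed: B inverts the loop nesting: instead of A's cell-major triple loop with a running max, B builds an N×M accumulator grid by adding one shifted copy of the board per shape offset (offset-major passes), then takes the max of the grid against 0.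
-- outside the precondition, e.g. on cal_total([[]], -6): A returns 0, B raises IndexError
import Mathlib
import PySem

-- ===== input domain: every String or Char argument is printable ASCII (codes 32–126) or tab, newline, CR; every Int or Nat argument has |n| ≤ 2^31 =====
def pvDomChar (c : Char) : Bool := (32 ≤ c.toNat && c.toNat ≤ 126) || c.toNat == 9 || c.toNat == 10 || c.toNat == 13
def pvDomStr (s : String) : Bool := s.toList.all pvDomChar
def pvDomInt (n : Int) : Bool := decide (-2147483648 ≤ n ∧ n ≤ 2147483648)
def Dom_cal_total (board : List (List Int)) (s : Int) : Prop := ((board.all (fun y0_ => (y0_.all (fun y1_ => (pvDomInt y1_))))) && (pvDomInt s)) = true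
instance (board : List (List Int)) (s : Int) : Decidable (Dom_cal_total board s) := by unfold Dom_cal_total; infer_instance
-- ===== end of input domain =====

-- B inverts the loop nesting: it accumulates an N×M total grid one shape-offset at a time
-- (offset-major) and takes the grid max against 0, instead of A's cell-major running max (alternative decomposition, same cost).


-- the module-level shape table shared by Source A and Source B (all offsets are non-negative literals)
def pyShape : List (List (Nat × Nat)) :=
  [[(0,0),(0,1),(0,2),(0,3)],
   [(0,0),(0,1),(1,1),(1,0)],
   [(0,0),(1,0),(2,0),(2,1)],
   [(0,0),(1,0),(1,1),(2,1)],
   [(0,0),(0,1),(0,2),(1,1)]]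

-- ===== PORT A =====
-- literal port of A's triple loop; the Python check '0 <= nx' is vacuous (i, dx ≥ 0),
-- so indices are Nat and only the upper bounds are tested, as in A.
def cal_total (board : List (List Int)) (s : Int) : Int :=
  let N := board.length
  let M := ((PySem.List.pyGet? board 0).getD []).length
  (List.range N).foldl (fun maxT i =>
    (List.range M).foldl (fun maxT j =>
      let total := ((PySem.List.pyGet? pyShape s).getD []).foldl
        (fun t d =>
          let nx := i + d.1
          let ny := j + d.2
          if nx < N ∧ ny < M then t + (board.getD nx []).getD ny 0 else t) 0
      if total > maxT then total else maxT) maxT) 0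

-- ===== PORT B =====
def cal_total_alt (board : List (List Int)) (s : Int) : Int :=
  let N := board.length
  let M := ((PySem.List.pyGet? board 0).getD []).length
  let init := (List.range N).map (fun _ => List.replicate M (0 : Int))
  let total := ((PySem.List.pyGet? pyShape s).getD []).foldl
    (fun g d =>
      (List.range N).map (fun i =>
        (List.range M).map (fun j =>
          (g.getD i []).getD j 0 +
            (if i + d.1 < N ∧ j + d.2 < M then (board.getD (i + d.1) []).getD (j + d.2) 0 else 0)))) init
  total.foldl (fun best row => row.foldl (fun b v => max b v) best) 0

-- ===== PRECONDITION & SPEC =====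
-- Pre_ excludes the inputs where the Python A raises IndexError — an empty board (board[0]),
-- a row shorter than the first row (board[nx][ny]), or s outside shape's index range — plus the
-- degenerate corner where the first row is empty AND s is out of range: there A returns 0 only
-- because its dead inner loop never evaluates shape[s], while B's loop header evaluates it and raises.
def Pre_cal_total (board : List (List Int)) (s : Int) : Prop :=
  board ≠ [] ∧ (∀ row ∈ board, (board.headD []).length ≤ row.length) ∧ -5 ≤ s ∧ s < 5
instance (board : List (List Int)) (s : Int) : Decidable (Pre_cal_total board s) := by
  unfold Pre_cal_total; infer_instance
def pvWitness_cal_total : List (List Int) × Int := ([[1, 2], [3, 4]], 0)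

def Spec_cal_total (board : List (List Int)) (s : Int) (out : Int) : Prop := out = cal_total_alt board s
instance (board : List (List Int)) (s : Int) (out : Int) : Decidable (Spec_cal_total board s out) := by unfold Spec_cal_total; infer_instance

-- ===== CLAIM (what is proved, stated in full; the proofs are below) =====
def Claim_equal_cal_total : Prop := ∀ (board : List (List Int)) (s : Int), Dom_cal_total board s → Pre_cal_total board s → Spec_cal_total board s (cal_total board s)

-- ===== LEMMAS AND PROOFS =====

-- reading cell (i,j) of a grid built as a map over ranges
theorem getD_map_range {α : Type} (g : Nat → α) (n i : Nat) (d : α) (h : i < n) :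
    ((List.range n).map g).getD i d = g i := by
  simp [List.getD, h]

-- the accumulator grid after folding any offset list over a pointwise-defined grid
theorem grid_fold_char (board : List (List Int)) (N M : Nat)
    (offs : List (Nat × Nat)) (f : Nat → Nat → Int) :
    offs.foldl
      (fun g d =>
        (List.range N).map (fun i =>
          (List.range M).map (fun j =>
            (g.getD i []).getD j 0 +
              (if i + d.1 < N ∧ j + d.2 < M then (board.getD (i + d.1) []).getD (j + d.2) 0 else 0))))
      ((List.range N).map (fun i => (List.range M).map (fun j => f i j)))
    = (List.range N).map (fun i => (List.range M).map (fun j =>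
        offs.foldl
          (fun t d => t + (if i + d.1 < N ∧ j + d.2 < M then (board.getD (i + d.1) []).getD (j + d.2) 0 else 0))
          (f i j))) := by
  induction offs generalizing f with
  | nil => simp
  | cons d offs ih =>
    simp only [List.foldl_cons]
    have hstep :
        (List.range N).map (fun i =>
          (List.range M).map (fun j =>
            ((((List.range N).map (fun i => (List.range M).map (fun j => f i j))).getD i []).getD j 0 +
              (if i + d.1 < N ∧ j + d.2 < M then (board.getD (i + d.1) []).getD (j + d.2) 0 else 0))))
        = (List.range N).map (fun i => (List.range M).map (fun j =>
            f i j + (if i + d.1 < N ∧ j + d.2 < M then (board.getD (i + d.1) []).getD (j + d.2) 0 else 0))) := by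
      refine List.map_congr_left (fun i hi => ?_)
      refine List.map_congr_left (fun j hj => ?_)
      rw [getD_map_range _ _ _ _ (List.mem_range.mp hi),
          getD_map_range _ _ _ _ (List.mem_range.mp hj)]
    rw [hstep, ih]

theorem cal_total_spec_aux (board : List (List Int)) (s : Int) :
    cal_total board s = cal_total_alt board s := by
  unfold cal_total cal_total_alt
  simp only []
  set N := board.length with hN
  set M := ((PySem.List.pyGet? board 0).getD []).length with hM
  set offs := ((PySem.List.pyGet? pyShape s).getD []) with hoffs
  -- initial grid is the pointwise grid of the constant 0
  have hinit : (List.range N).map (fun _ => List.replicate M (0 : Int))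
      = (List.range N).map (fun _ => (List.range M).map (fun _ => (0 : Int))) := by
    simp
  rw [hinit, grid_fold_char board N M offs (fun _ _ => 0)]
  -- flatten B's max pass over the pointwise grid
  rw [List.foldl_map]
  simp only [List.foldl_map]
  -- pointwise: A's inner accumulation and running max equal B's
  congr 1
  funext maxT i
  congr 1
  funext acc j
  have hcell : offs.foldl
      (fun t d => if i + d.1 < N ∧ j + d.2 < M then t + (board.getD (i + d.1) []).getD (j + d.2) 0 else t) 0
      = offs.foldl
      (fun t d => t + (if i + d.1 < N ∧ j + d.2 < M then (board.getD (i + d.1) []).getD (j + d.2) 0 else 0)) 0 := by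
    congr 1
    funext t d
    split <;> simp
  rw [hcell]
  set c := offs.foldl
      (fun t d => t + (if i + d.1 < N ∧ j + d.2 < M then (board.getD (i + d.1) []).getD (j + d.2) 0 else 0)) 0
  rw [max_def]
  split_ifs <;> omega

-- ===== VERDICT (by name: the statement is the Claim_ definition above) =====
theorem cal_total_spec : Claim_equal_cal_total := by
  intro board s _ _
  unfold Spec_cal_total
  exact cal_total_spec_aux board s
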